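-- pv_equiv track=rewrite | github.com/doinacauliuc/Prompt-Engineering | Script/estrazione_articoli.py | estrai_corpo
-- ===== SOURCE A (Python) =====
-- def estrai_corpo(lines):
--     # Trova la riga che inizia con ~ (data)
--     start_idx = None
--     for idx, line in enumerate(lines):
--         if line.strip().startswith("~"):
--             start_idx = idx
--             break
--     if start_idx is None or start_idx == len(lines) - 1:
--         return ""
--     # Prendi tutte le righe DOPO la data (esclude la riga data stessa)
--     corpo = [l.strip() for l in lines[start_idx + 1:] if l.strip()]
--     # Escludi righe "IN AGGIORNAMENTO"
--     corpo = [l for l in corpo if not l.upper().startswith("IN AGGIORNAMENTO")]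
--     return " ".join(corpo)
-- ===== SOURCE B (Python) =====
-- def estrai_corpo(lines):
--     # single pass: flag + accumulator instead of index search, slice and two comprehensions
--     found = False
--     corpo = []
--     for line in lines:
--         s = line.strip()
--         if not found:
--             if s.startswith("~"):
--                 found = True
--             continue
--         if s and not s.upper().startswith("IN AGGIORNAMENTO"):
--             corpo.append(s)
--     return " ".join(corpo)
-- ===== Notes on version B (the rewrite author's own statement) =====
-- stated objective: simpler
-- what changed: Replaces the index search + slice + two list comprehensions with one pass over the lines that keeps a found-marker flag and an accumulator.
import Mathlib
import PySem

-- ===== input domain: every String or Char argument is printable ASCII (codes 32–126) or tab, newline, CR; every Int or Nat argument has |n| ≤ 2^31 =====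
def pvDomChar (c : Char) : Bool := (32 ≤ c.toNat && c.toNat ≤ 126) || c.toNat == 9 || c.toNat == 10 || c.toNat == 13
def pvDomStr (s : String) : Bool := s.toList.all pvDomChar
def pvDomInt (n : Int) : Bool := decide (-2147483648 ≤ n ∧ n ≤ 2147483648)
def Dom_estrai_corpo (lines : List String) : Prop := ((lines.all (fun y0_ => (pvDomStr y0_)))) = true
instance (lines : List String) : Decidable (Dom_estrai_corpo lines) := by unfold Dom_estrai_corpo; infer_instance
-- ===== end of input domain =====

-- B replaces A's index search + slice + two comprehensions by one pass with a found-flag and an accumulator (same cost, simpler shape).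


-- ===== PORT A =====
-- A's first loop: index of the first line whose strip starts with "~" (enumerate + break)
def estraiFind (lines : List String) : Option Nat :=
  match lines with
  | [] => none
  | l :: ls =>
    if PySem.Str.startswith (PySem.Str.strip l) "~" then some 0
    else (estraiFind ls).map (· + 1)

def estrai_corpo (lines : List String) : String :=
  match estraiFind lines with
  | none => ""
  | some start_idx =>
    if (start_idx : Int) = PySem.List.len lines - 1 then ""
    else
      let corpo := ((PySem.List.slice lines (some ((start_idx : Int) + 1)) none).filter
        (fun l => PySem.Str.strip l != "")).map (fun l => PySem.Str.strip l)
      let corpo := corpo.filter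
        (fun l => !PySem.Str.startswith (PySem.Str.upper l) "IN AGGIORNAMENTO")
      PySem.Str.join " " corpo

-- ===== PORT B =====
-- Source B's loop body: state = (found, corpo)
def altStep (st : Bool × List String) (line : String) : Bool × List String :=
  let s := PySem.Str.strip line
  if !st.1 then
    (if PySem.Str.startswith s "~" then true else st.1, st.2)
  else if s != "" && !PySem.Str.startswith (PySem.Str.upper s) "IN AGGIORNAMENTO" then
    (st.1, st.2 ++ [s])
  else st

def estrai_corpo_alt (lines : List String) : String :=
  PySem.Str.join " " (lines.foldl altStep (false, [])).2

-- ===== PRECONDITION & SPEC =====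
def Spec_estrai_corpo (lines : List String) (out : String) : Prop := out = estrai_corpo_alt lines
instance (lines : List String) (out : String) : Decidable (Spec_estrai_corpo lines out) := by unfold Spec_estrai_corpo; infer_instance

-- ===== CLAIM (what is proved, stated in full; the proofs are below) =====
def Claim_equal_estrai_corpo : Prop := ∀ (lines : List String), Dom_estrai_corpo lines → Spec_estrai_corpo lines (estrai_corpo lines)

-- ===== LEMMAS AND PROOFS =====

def keepLine (s : String) : Bool :=
  s != "" && !PySem.Str.startswith (PySem.Str.upper s) "IN AGGIORNAMENTO"

theorem altStep_true (acc : List String) (l : String) :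
    altStep (true, acc) l =
      if keepLine (PySem.Str.strip l) then (true, acc ++ [PySem.Str.strip l]) else (true, acc) := by
  simp [altStep, keepLine]

theorem altStep_false (l : String)
    (hl : PySem.Str.startswith (PySem.Str.strip l) "~" = false) :
    altStep (false, []) l = (false, []) := by
  simp only [altStep, hl]
  simp

theorem altStep_false_mark (m : String)
    (hm : PySem.Str.startswith (PySem.Str.strip m) "~" = true) :
    altStep (false, []) m = (true, []) := by
  simp only [altStep, hm]
  simp

-- after the marker is found, B just appends the kept stripped lines
theorem foldl_altStep_true (ls : List String) (acc : List String) :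
    ls.foldl altStep (true, acc) =
      (true, acc ++ (ls.map PySem.Str.strip).filter keepLine) := by
  induction ls generalizing acc with
  | nil => simp
  | cons l ls ih =>
    simp only [List.foldl_cons, List.map_cons, List.filter_cons, altStep_true]
    by_cases h : keepLine (PySem.Str.strip l) = true
    · rw [if_pos h, if_pos h, ih]
      simp
    · rw [if_neg h, if_neg h, ih]

-- before the marker is found, B skips non-marker lines
theorem foldl_altStep_false (ls : List String)
    (h : ∀ l ∈ ls, PySem.Str.startswith (PySem.Str.strip l) "~" = false) :
    ls.foldl altStep (false, []) = (false, []) := by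
  induction ls with
  | nil => rfl
  | cons l ls ih =>
    simp only [List.foldl_cons, altStep_false l (h l (by simp))]
    exact ih (fun x hx => h x (by simp [hx]))

-- characterisation of A's index search
theorem estraiFind_none (ls : List String) (h : estraiFind ls = none) :
    ∀ l ∈ ls, PySem.Str.startswith (PySem.Str.strip l) "~" = false := by
  induction ls with
  | nil => simp
  | cons l ls ih =>
    simp only [estraiFind] at h
    by_cases hm : PySem.Str.startswith (PySem.Str.strip l) "~" = true
    · rw [if_pos hm] at h; cases h
    · rw [if_neg hm] at h
      intro x hx
      rcases List.mem_cons.mp hx with rfl | hx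
      · simpa using hm
      · exact ih (by simpa [Option.map_eq_none_iff] using h) x hx

theorem estraiFind_some (ls : List String) (i : Nat) (h : estraiFind ls = some i) :
    ∃ pre m rest, ls = pre ++ m :: rest ∧ pre.length = i ∧
      (∀ l ∈ pre, PySem.Str.startswith (PySem.Str.strip l) "~" = false) ∧
      PySem.Str.startswith (PySem.Str.strip m) "~" = true := by
  induction ls generalizing i with
  | nil => simp [estraiFind] at h
  | cons l ls ih =>
    simp only [estraiFind] at h
    by_cases hm : PySem.Str.startswith (PySem.Str.strip l) "~" = true
    · rw [if_pos hm] at h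
      refine ⟨[], l, ls, by simp, ?_, by simp, hm⟩
      simpa using Option.some.inj h
    · rw [if_neg hm] at h
      rw [Option.map_eq_some_iff] at h
      obtain ⟨j, hj, hji⟩ := h
      obtain ⟨pre, m, rest, hsplit, hlen, hpre, hmk⟩ := ih j hj
      refine ⟨l :: pre, m, rest, by simp [hsplit], by simp [hlen, hji], ?_, hmk⟩
      intro x hx
      rcases List.mem_cons.mp hx with rfl | hx
      · simpa using hm
      · exact hpre x hx

-- A's value in the found case, uniformly (marker-last gives the empty join)
theorem estrai_corpo_eq_join (lines : List String) (pre : List String) (m : String)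
    (rest : List String) (hsplit : lines = pre ++ m :: rest)
    (hfind : estraiFind lines = some pre.length) :
    estrai_corpo lines = PySem.Str.join " "
      (((rest.filter (fun l => PySem.Str.strip l != "")).map (fun l => PySem.Str.strip l)).filter
        (fun l => !PySem.Str.startswith (PySem.Str.upper l) "IN AGGIORNAMENTO")) := by
  have hlen : lines.length = pre.length + 1 + rest.length := by
    subst hsplit; simp [List.length_append]; omega
  have hslice : PySem.List.slice lines (some ((pre.length : Int) + 1)) none = rest := by
    have hc : ((pre.length : Int) + 1) = ((pre.length + 1 : Nat) : Int) := by push_cast; ring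
    rw [hc, PySem.List.slice_from_natCast, hsplit]
    simp
  unfold estrai_corpo
  rw [hfind]
  simp only
  by_cases hlast : (pre.length : Int) = PySem.List.len lines - 1
  · -- marker is the last line: rest = [] and both sides are ""
    have hlast' := hlast
    rw [PySem.List.len_eq] at hlast'
    have hrest : rest = [] := by
      cases rest with
      | nil => rfl
      | cons a t => exfalso; simp at hlen; omega
    subst hrest
    rw [if_pos hlast]
    rfl
  · rw [if_neg hlast, hslice]

-- the two ways of filtering and stripping produce the same list
theorem body_eq (rest : List String) :
    ((rest.filter (fun l => PySem.Str.strip l != "")).map (fun l => PySem.Str.strip l)).filter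
        (fun l => !PySem.Str.startswith (PySem.Str.upper l) "IN AGGIORNAMENTO") =
      (rest.map PySem.Str.strip).filter keepLine := by
  rw [List.filter_map, List.filter_filter, List.filter_map]
  apply congrArg (List.map _)
  apply List.filter_congr
  intro a _
  simp [Function.comp, keepLine, Bool.and_comm]

theorem estrai_corpo_eq_alt (lines : List String) :
    estrai_corpo lines = estrai_corpo_alt lines := by
  cases h : estraiFind lines with
  | none =>
    unfold estrai_corpo estrai_corpo_alt
    rw [h, foldl_altStep_false lines (estraiFind_none lines h)]
    rfl
  | some i =>
    obtain ⟨pre, m, rest, hsplit, hlen, hpre, hmk⟩ := estraiFind_some lines i h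
    subst hlen
    rw [estrai_corpo_eq_join lines pre m rest hsplit h, body_eq]
    unfold estrai_corpo_alt
    rw [hsplit, List.foldl_append, foldl_altStep_false pre hpre, List.foldl_cons,
      altStep_false_mark m hmk, foldl_altStep_true]
    rfl

-- ===== VERDICT (by name: the statement is the Claim_ definition above) =====
theorem estrai_corpo_spec : Claim_equal_estrai_corpo := by
  intro lines _
  unfold Spec_estrai_corpo
  exact estrai_corpo_eq_alt lines
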